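-- pv_equiv track=rewrite | github.com/CrazyArunr/pluseback | pulse_qa_api/api/mongo_api.py | generate_annotated_content
-- ===== SOURCE A (Python) =====
-- from typing import Optional, List, Dict, Any
--
-- def generate_annotated_content(original_content: str, scenarios: List[Dict], classifications: List[str]) -> str:
--     """Generate content with properly placed tags"""
--     lines = original_content.split('\n')
--     result_lines = []
--
--     line_to_classification = {}
--     for scenario, classification in zip(scenarios, classifications):
--         line_to_classification[scenario['start_line']] = classification
--
--     i = 0
--     while i < len(lines):
--         line = lines[i]
--
--         if i in line_to_classification:
--             classification = line_to_classification[i]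
--
--             scenario_line = line.strip()
--             if scenario_line.startswith(('Scenario:', 'Scenario Outline:')):
--                 indent = len(line) - len(line.lstrip())
--                 tag_indent = ' ' * indent
--
--                 if classification == 'smoke_regression':
--                     result_lines.append(f"{tag_indent}@smoke")
--                     result_lines.append(f"{tag_indent}@regression")
--                 else:
--                     result_lines.append(f"{tag_indent}@regression")
--
--         result_lines.append(line)
--         i += 1
--
--     return '\n'.join(result_lines)
-- ===== SOURCE B (Python) =====
-- def generate_annotated_content(original_content, scenarios, classifications):
--     """Generate content with properly placed tags.
--
--     Splice-based version: resolve last-wins tag insertion points by a reverse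
--     scan (no dict), sort the points, then assemble the output by jumping
--     between insertion points with slices instead of testing every line."""
--     lines = original_content.split('\n')
--
--     seen = set()
--     points = []  # (line index, ready-made tag lines), at most one per index
--     for scenario, classification in reversed(list(zip(scenarios, classifications))):
--         idx = scenario['start_line']
--         if idx in seen:
--             continue
--         seen.add(idx)
--         if 0 <= idx < len(lines):
--             line = lines[idx]
--             if line.strip().startswith(('Scenario:', 'Scenario Outline:')):
--                 indent = ' ' * (len(line) - len(line.lstrip()))
--                 if classification == 'smoke_regression':
--                     points.append((idx, [indent + '@smoke', indent + '@regression']))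
--                 else:
--                     points.append((idx, [indent + '@regression']))
--     points.sort(key=lambda p: p[0])
--
--     out = []
--     prev = 0
--     for idx, tags in points:
--         out += lines[prev:idx]
--         out += tags
--         out.append(lines[idx])
--         prev = idx + 1
--     out += lines[prev:]
--     return '\n'.join(out)
-- ===== Notes on version B (the rewrite author's own statement) =====
-- stated objective: alternative
-- what changed: B drops A's dict and per-line membership test entirely: it resolves last-wins insertion points by a reverse scan over zip(scenarios, classifications) with a seen-set, sorts the points by line index, and assembles the output by splicing slices of lines between insertion points instead of testing every line.
import Mathlib
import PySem

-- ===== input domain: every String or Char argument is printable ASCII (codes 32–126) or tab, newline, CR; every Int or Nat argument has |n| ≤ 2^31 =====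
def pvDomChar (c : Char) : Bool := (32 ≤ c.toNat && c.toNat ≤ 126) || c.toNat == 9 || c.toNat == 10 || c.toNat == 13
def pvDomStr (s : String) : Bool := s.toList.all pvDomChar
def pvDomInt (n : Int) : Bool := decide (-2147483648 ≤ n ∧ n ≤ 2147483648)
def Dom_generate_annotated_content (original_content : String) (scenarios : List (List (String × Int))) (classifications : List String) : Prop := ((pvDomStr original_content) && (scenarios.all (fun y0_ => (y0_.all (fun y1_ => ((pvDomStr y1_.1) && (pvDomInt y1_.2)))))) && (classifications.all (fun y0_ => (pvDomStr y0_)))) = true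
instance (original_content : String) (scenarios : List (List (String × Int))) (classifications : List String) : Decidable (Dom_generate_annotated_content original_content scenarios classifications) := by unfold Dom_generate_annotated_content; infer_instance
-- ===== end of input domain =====

-- B replaces A's dict-then-scan-every-line strategy by collecting tag insertion points via a
-- reverse scan with a seen-set, sorting them, and splicing slices between insertion points
-- (objective: alternative algorithm; same return value wherever A returns).

-- ===== PORT A =====
-- Literal port of A: one dict mapping start_line -> classification (last wins),
-- then one loop over the lines that classifies and emits.
def generate_annotated_content (original_content : String) (scenarios : List (List (String × Int))) (classifications : List String) : String :=
  let lines : List String := (PySem.Str.split? original_content "\n").getD []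
  -- line_to_classification[scenario['start_line']] = classification  (Pre_ guarantees the key exists; .getD 0 is never the taken branch inside Pre_)
  let line_to_classification : PySem.Dict Int String :=
    (scenarios.zip classifications).foldl
      (fun d p => d.insert ((p.1.lookup "start_line").getD 0) p.2) PySem.Dict.empty
  let result_lines : List String :=
    (PySem.List.enumerate lines).foldl
      (fun acc il =>
        let i := il.1
        let line := il.2
        let acc :=
          match line_to_classification.get? i with
          | some classification =>
            let scenario_line := PySem.Str.strip line
            if PySem.Str.startswith scenario_line "Scenario:" || PySem.Str.startswith scenario_line "Scenario Outline:" then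
              let indent : Nat := (PySem.Str.len line - PySem.Str.len (PySem.Str.lstrip line)).toNat
              let tag_indent : String := String.ofList (List.replicate indent ' ')
              if classification == "smoke_regression" then
                (acc ++ [tag_indent ++ "@smoke"]) ++ [tag_indent ++ "@regression"]
              else
                acc ++ [tag_indent ++ "@regression"]
            else acc
          | none => acc
        acc ++ [line]) []
  PySem.Str.join "\n" result_lines

-- ===== PORT B =====
-- B-side helpers: the two loop bodies of Source B.
-- pvStep1 = one iteration of the reverse collection loop (state: seen set, collected points).
def pvStep1 (lines : List String) (st : PySem.Set Int × List (Int × List String))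
    (p : List (String × Int) × String) : PySem.Set Int × List (Int × List String) :=
  let idx : Int := (p.1.lookup "start_line").getD 0
  if PySem.Set.contains st.1 idx then st
  else
    let seen := PySem.Set.add st.1 idx
    if 0 ≤ idx && idx < (lines.length : Int) then
      let line := (PySem.List.pyGet? lines idx).getD ""
      if PySem.Str.startswith (PySem.Str.strip line) "Scenario:" || PySem.Str.startswith (PySem.Str.strip line) "Scenario Outline:" then
        let indent : String := String.ofList (List.replicate (PySem.Str.len line - PySem.Str.len (PySem.Str.lstrip line)).toNat ' ')
        if p.2 == "smoke_regression" then
          (seen, st.2 ++ [(idx, [indent ++ "@smoke", indent ++ "@regression"])])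
        else
          (seen, st.2 ++ [(idx, [indent ++ "@regression"])])
      else (seen, st.2)
    else (seen, st.2)

-- pvStep2 = one iteration of the splice loop (state: output lines, prev).
def pvStep2 (lines : List String) (ot : List String × Int) (q : Int × List String) : List String × Int :=
  (((ot.1 ++ PySem.List.slice lines (some ot.2) (some q.1)) ++ q.2) ++ [(PySem.List.pyGet? lines q.1).getD ""], q.1 + 1)

-- Port of B: reverse scan with a seen-set collecting insertion points, sort by index, splice.
def generate_annotated_content_alt (original_content : String) (scenarios : List (List (String × Int))) (classifications : List String) : String :=
  let lines : List String := (PySem.Str.split? original_content "\n").getD []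
  let collected : PySem.Set Int × List (Int × List String) :=
    ((scenarios.zip classifications).reverse).foldl (pvStep1 lines) (PySem.Set.empty, [])
  let points : List (Int × List String) := PySem.List.sorted collected.2 (fun q => q.1) false
  let fin : List String × Int := points.foldl (pvStep2 lines) ([], 0)
  PySem.Str.join "\n" (fin.1 ++ PySem.List.slice lines (some fin.2) none)

-- ===== PRECONDITION & SPEC =====
-- Pre_ excludes exactly the inputs where A raises KeyError: a scenario paired (by zip) with a classification but lacking a 'start_line' key.
def Pre_generate_annotated_content (original_content : String) (scenarios : List (List (String × Int))) (classifications : List String) : Prop :=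
  ∀ p ∈ scenarios.zip classifications, (p.1.lookup "start_line").isSome = true
instance (original_content : String) (scenarios : List (List (String × Int))) (classifications : List String) : Decidable (Pre_generate_annotated_content original_content scenarios classifications) := by unfold Pre_generate_annotated_content; infer_instance

def pvWitness_generate_annotated_content : String × (List (List (String × Int))) × List String :=
  ("Feature: f\n  Scenario: a\n  step", [[("start_line", 1)]], ["smoke_regression"])

def Spec_generate_annotated_content (original_content : String) (scenarios : List (List (String × Int))) (classifications : List String) (out : String) : Prop := out = generate_annotated_content_alt original_content scenarios classifications
instance (original_content : String) (scenarios : List (List (String × Int))) (classifications : List String) (out : String) : Decidable (Spec_generate_annotated_content original_content scenarios classifications out) := by unfold Spec_generate_annotated_content; infer_instance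

-- ===== CLAIM (what is proved, stated in full; the proofs are below) =====
def Claim_equal_generate_annotated_content : Prop := ∀ (original_content : String) (scenarios : List (List (String × Int))) (classifications : List String), Dom_generate_annotated_content original_content scenarios classifications → Pre_generate_annotated_content original_content scenarios classifications → Spec_generate_annotated_content original_content scenarios classifications (generate_annotated_content original_content scenarios classifications)

-- ===== LEMMAS AND PROOFS =====

-- The line at index i of the split content.
def pvLine (lines : List String) (i : Int) : String := (PySem.List.pyGet? lines i).getD ""

-- Is this line a scenario line?
def pvCond (line : String) : Bool :=
  PySem.Str.startswith (PySem.Str.strip line) "Scenario:" || PySem.Str.startswith (PySem.Str.strip line) "Scenario Outline:"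

-- The tag lines inserted before a scenario line with classification c.
def pvTags (line c : String) : List String :=
  let ti := String.ofList (List.replicate (PySem.Str.len line - PySem.Str.len (PySem.Str.lstrip line)).toNat ' ')
  if c == "smoke_regression" then [ti ++ "@smoke", ti ++ "@regression"] else [ti ++ "@regression"]

-- What A inserts before line i, given its classification dict.
def pvIns (lines : List String) (d : PySem.Dict Int String) (i : Int) : List String :=
  match d.get? i with
  | some c => if pvCond (pvLine lines i) then pvTags (pvLine lines i) c else []
  | none => []

-- Lookup B's point list by line index (first match; indices are distinct).
def pvLk (pts : List (Int × List String)) (j : Int) : Option (List String) :=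
  (pts.find? (fun q => q.1 == j)).map (·.2)

-- Reference emitter: lines interleaved with their insertions, indexed from i.
def pvEmit (ins : Int → List String) : List String → Int → List String
  | [], _ => []
  | l :: t, i => ins i ++ l :: pvEmit ins t (i + 1)

lemma pvEmit_enum (ins : Int → List String) (l : List String) : ∀ (s : Int),
    (PySem.List.enumerate l s).flatMap (fun il => ins il.1 ++ [il.2]) = pvEmit ins l s := by
  induction l with
  | nil => intro s; simp [PySem.List.enumerate_nil, pvEmit]
  | cons x t ih => intro s; simp [PySem.List.enumerate_cons, pvEmit, ih]

-- A's classification dict looked up at j is the LAST zip pair with start_line j.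
lemma pvDict_get (ps : List (List (String × Int) × String)) : ∀ (d : PySem.Dict Int String) (j : Int),
    (ps.foldl (fun d p => d.insert ((p.1.lookup "start_line").getD 0) p.2) d).get? j
      = match ps.reverse.find? (fun p => ((p.1.lookup "start_line").getD 0) == j) with
        | some p => some p.2
        | none => d.get? j := by
  induction ps with
  | nil => intro d j; simp
  | cons p ps ih =>
    intro d j
    simp only [List.foldl_cons, List.reverse_cons, List.find?_append]
    rw [ih]
    cases hf : ps.reverse.find? (fun p => ((p.1.lookup "start_line").getD 0) == j) with
    | some q => simp
    | none =>
      simp only [Option.none_or]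
      by_cases he : ((p.1.lookup "start_line").getD 0) = j
      · rw [← he, PySem.Dict.get?_insert_self]
        simp [he]
      · rw [PySem.Dict.get?_insert_of_ne _ _ (fun h => he h.symm)]
        simp [he]

lemma pvLk_append_ne (pts e : List (Int × List String)) (j : Int)
    (he : ∀ r ∈ e, r.1 ≠ j) : pvLk (pts ++ e) j = pvLk pts j := by
  unfold pvLk
  rw [List.find?_append]
  cases hf : pts.find? (fun q => q.1 == j) with
  | some q => simp
  | none =>
    have : e.find? (fun q => q.1 == j) = none := by
      rw [List.find?_eq_none]
      intro r hr
      simpa using he r hr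
    simp [this]

lemma pvLk_none_of_sub (pts : List (Int × List String)) (j : Int)
    (h : ∀ q ∈ pts, q.1 ≠ j) : pvLk pts j = none := by
  unfold pvLk
  rw [List.find?_eq_none.mpr (fun q hq => by simpa using h q hq)]
  rfl

lemma pv_fst_nodup_unique {pts : List (Int × List String)} {j : Int} {v w : List String}
    (hnd : (pts.map Prod.fst).Nodup) (hv : (j, v) ∈ pts) (hw : (j, w) ∈ pts) : v = w := by
  induction pts with
  | nil => cases hv
  | cons a t ih =>
    simp only [List.map_cons, List.nodup_cons] at hnd
    rcases List.mem_cons.mp hv with rfl | hv'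
    · rcases List.mem_cons.mp hw with h | hw'
      · exact (congrArg Prod.snd h).symm
      · exact absurd (List.mem_map.mpr ⟨_, hw', rfl⟩) hnd.1
    · rcases List.mem_cons.mp hw with rfl | hw'
      · exact absurd (List.mem_map.mpr ⟨_, hv', rfl⟩) hnd.1
      · exact ih hnd.2 hv' hw'

lemma pvLk_eq_some_iff {pts : List (Int × List String)} {j : Int} {v : List String}
    (hnd : (pts.map Prod.fst).Nodup) : pvLk pts j = some v ↔ (j, v) ∈ pts := by
  constructor
  · intro h
    unfold pvLk at h
    rcases Option.map_eq_some_iff.mp h with ⟨q, hq, hv⟩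
    have hj : q.1 = j := by simpa using List.find?_some hq
    have hm := List.mem_of_find?_eq_some hq
    have : q = (j, v) := by cases q; simp_all
    rwa [this] at hm
  · intro h
    cases hf : pts.find? (fun q => q.1 == j) with
    | none =>
      exfalso
      exact absurd (by simp : ((j, v).1 == j) = true)
        (by simpa using List.find?_eq_none.mp hf _ h)
    | some q =>
      have hj : q.1 = j := by simpa using List.find?_some hf
      have hm := List.mem_of_find?_eq_some hf
      have hq2 : q.2 = v := by
        have : (j, q.2) ∈ pts := by cases q; simp_all
        exact pv_fst_nodup_unique hnd this h
      unfold pvLk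
      rw [hf]
      simp [hq2]

lemma pvLk_perm {pts pts' : List (Int × List String)} (hp : pts'.Perm pts)
    (hnd : (pts.map Prod.fst).Nodup) (j : Int) : pvLk pts' j = pvLk pts j := by
  have hnd' : (pts'.map Prod.fst).Nodup := ((hp.map Prod.fst).nodup_iff).mpr hnd
  cases h : pvLk pts j with
  | some v =>
    exact (pvLk_eq_some_iff hnd').mpr (hp.mem_iff.mpr ((pvLk_eq_some_iff hnd).mp h))
  | none =>
    apply pvLk_none_of_sub
    intro q hq hqj
    have : pvLk pts j = some q.2 :=
      (pvLk_eq_some_iff hnd).mpr (by rw [← hqj] at *; exact hp.mem_iff.mp (by cases q; simpa using hq))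
    rw [h] at this; cases this

-- Phase-1 invariant: the collection fold's points, characterised by first match in qs.
lemma pvPhase1 (lines : List String) (qs : List (List (String × Int) × String)) :
    ∀ (seen : PySem.Set Int) (pts : List (Int × List String)),
    (∀ q ∈ pts, q.1 ∈ seen) →
    ((pts.map Prod.fst).Nodup) →
    (∀ q ∈ (qs.foldl (pvStep1 lines) (seen, pts)).2, q ∈ pts ∨ (0 ≤ q.1 ∧ q.1 < (lines.length : Int)))
    ∧ (((qs.foldl (pvStep1 lines) (seen, pts)).2.map Prod.fst).Nodup)
    ∧ (∀ j, j ∈ seen → pvLk (qs.foldl (pvStep1 lines) (seen, pts)).2 j = pvLk pts j)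
    ∧ (∀ j, j ∉ seen → pvLk (qs.foldl (pvStep1 lines) (seen, pts)).2 j =
        match qs.find? (fun p => ((p.1.lookup "start_line").getD 0) == j) with
        | some p => if (0 ≤ j ∧ j < (lines.length : Int)) ∧ pvCond (pvLine lines j) = true
                    then some (pvTags (pvLine lines j) p.2) else none
        | none => none) := by
  induction qs with
  | nil =>
    intro seen pts hsub hnd
    refine ⟨fun q hq => Or.inl hq, hnd, fun j _ => rfl, fun j hj => ?_⟩
    simp only [List.foldl_nil, List.find?_nil]
    exact pvLk_none_of_sub pts j (fun q hq hqj => hj (hqj ▸ hsub q hq))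
  | cons q qs ih =>
    intro seen pts hsub hnd
    simp only [List.foldl_cons]
    by_cases hc : ((q.1.lookup "start_line").getD 0) ∈ seen
    · have hctrue : PySem.Set.contains seen ((q.1.lookup "start_line").getD 0) = true := by
        simp [pysem, hc]
      have hstep : pvStep1 lines (seen, pts) q = (seen, pts) := by
        simp only [pvStep1]
        rw [if_pos hctrue]
      rw [hstep]
      obtain ⟨h1, h2, h3, h4⟩ := ih seen pts hsub hnd
      refine ⟨h1, h2, h3, fun j hj => ?_⟩
      rw [h4 j hj]
      have hne : (((q.1.lookup "start_line").getD 0) == j) = false := by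
        simp only [beq_eq_false_iff_ne, ne_eq]
        intro he; exact hj (he ▸ hc)
      rw [List.find?_cons_of_neg (by simp [hne])]
    · -- idx not seen yet
      have hcf : PySem.Set.contains seen ((q.1.lookup "start_line").getD 0) = false := by
        simp [pysem, hc]
      have hadd : PySem.Set.add seen ((q.1.lookup "start_line").getD 0)
          = seen ++ [((q.1.lookup "start_line").getD 0)] := PySem.Set.add_of_not_mem hc
      -- the new points are pts ++ e for the branch-determined e
      have key : ∀ (e : List (Int × List String)),
          ((e.map Prod.fst).Nodup) →
          (∀ r ∈ e, r.1 = ((q.1.lookup "start_line").getD 0)) →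
          (∀ r ∈ e, 0 ≤ r.1 ∧ r.1 < (lines.length : Int)) →
          (pvLk e ((q.1.lookup "start_line").getD 0) =
            (if (0 ≤ ((q.1.lookup "start_line").getD 0) ∧ ((q.1.lookup "start_line").getD 0) < (lines.length : Int)) ∧ pvCond (pvLine lines ((q.1.lookup "start_line").getD 0)) = true
              then some (pvTags (pvLine lines ((q.1.lookup "start_line").getD 0)) q.2) else none)) →
          (∀ qq ∈ (qs.foldl (pvStep1 lines) (seen ++ [((q.1.lookup "start_line").getD 0)], pts ++ e)).2, qq ∈ pts ∨ (0 ≤ qq.1 ∧ qq.1 < (lines.length : Int)))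
          ∧ ((((qs.foldl (pvStep1 lines) (seen ++ [((q.1.lookup "start_line").getD 0)], pts ++ e)).2).map Prod.fst).Nodup)
          ∧ (∀ j, j ∈ seen → pvLk (qs.foldl (pvStep1 lines) (seen ++ [((q.1.lookup "start_line").getD 0)], pts ++ e)).2 j = pvLk pts j)
          ∧ (∀ j, j ∉ seen → pvLk (qs.foldl (pvStep1 lines) (seen ++ [((q.1.lookup "start_line").getD 0)], pts ++ e)).2 j =
              match (q :: qs).find? (fun p => ((p.1.lookup "start_line").getD 0) == j) with
              | some p => if (0 ≤ j ∧ j < (lines.length : Int)) ∧ pvCond (pvLine lines j) = true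
                          then some (pvTags (pvLine lines j) p.2) else none
              | none => none) := by
        intro e hnde hefst herange helk
        have hsub' : ∀ r ∈ pts ++ e, r.1 ∈ seen ++ [((q.1.lookup "start_line").getD 0)] := by
          intro r hr
          rcases List.mem_append.mp hr with h | h
          · exact List.mem_append.mpr (Or.inl (hsub r h))
          · exact List.mem_append.mpr (Or.inr (by simp [hefst r h]))
        have hnd' : ((pts ++ e).map Prod.fst).Nodup := by
          rw [List.map_append, List.nodup_append]
          refine ⟨hnd, hnde, ?_⟩
          · intro a ha b hb
            rcases List.mem_map.mp ha with ⟨r, hr, rfl⟩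
            rcases List.mem_map.mp hb with ⟨s, hs, rfl⟩
            rw [hefst s hs]
            intro he
            exact hc (he ▸ hsub r hr)
        obtain ⟨h1, h2, h3, h4⟩ := ih (seen ++ [((q.1.lookup "start_line").getD 0)]) (pts ++ e) hsub' hnd'
        refine ⟨?_, h2, ?_, ?_⟩
        · intro qq hqq
          rcases h1 qq hqq with h | h
          · rcases List.mem_append.mp h with h | h
            · exact Or.inl h
            · exact Or.inr (herange qq h)
          · exact Or.inr h
        · intro j hj
          have hj' : j ∈ seen ++ [((q.1.lookup "start_line").getD 0)] := List.mem_append.mpr (Or.inl hj)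
          rw [h3 j hj']
          exact pvLk_append_ne pts e j (fun r hr => by rw [hefst r hr]; intro he; exact hc (he ▸ hj))
        · intro j hj
          by_cases hje : j = ((q.1.lookup "start_line").getD 0)
          · subst hje
            have hj' : ((q.1.lookup "start_line").getD 0) ∈ seen ++ [((q.1.lookup "start_line").getD 0)] :=
              List.mem_append.mpr (Or.inr (by simp))
            rw [h3 _ hj']
            have hlkpts : pts.find? (fun r => r.1 == ((q.1.lookup "start_line").getD 0)) = none := by
              rw [List.find?_eq_none]
              intro r hr
              simp only [beq_iff_eq]
              intro he; exact hc (he ▸ hsub r hr)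
            have hsplit : pvLk (pts ++ e) ((q.1.lookup "start_line").getD 0) = pvLk e ((q.1.lookup "start_line").getD 0) := by
              unfold pvLk; rw [List.find?_append, hlkpts]; rfl
            rw [hsplit, helk]
            rw [List.find?_cons_of_pos (by simp)]
          · have hj' : j ∉ seen ++ [((q.1.lookup "start_line").getD 0)] := by
              intro h
              rcases List.mem_append.mp h with h | h
              · exact hj h
              · exact hje (by simpa using h)
            rw [h4 j hj']
            rw [List.find?_cons_of_neg (by simp only [beq_iff_eq]; omega)]
      -- now split pvStep1's branches
      have hstep : pvStep1 lines (seen, pts) q =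
          (seen ++ [((q.1.lookup "start_line").getD 0)], pts ++
            (if (0 ≤ ((q.1.lookup "start_line").getD 0) && ((q.1.lookup "start_line").getD 0) < (lines.length : Int)) then
              (if pvCond (pvLine lines ((q.1.lookup "start_line").getD 0)) then
                [(((q.1.lookup "start_line").getD 0), pvTags (pvLine lines ((q.1.lookup "start_line").getD 0)) q.2)]
              else [])
            else [])) := by
        simp only [pvStep1, hcf, Bool.false_eq_true, if_false, hadd, pvCond, pvLine, pvTags]
        split
        · split
          · split <;> simp
          · simp
        · simp
      rw [hstep]
      apply key
      · split
        · split
          · simp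
          · simp
        · simp
      · intro r hr
        split at hr
        · split at hr
          · simp only [List.mem_singleton] at hr
            rw [hr]
          · simp at hr
        · simp at hr
      · intro r hr
        split at hr
        next hrange =>
          split at hr
          · simp only [List.mem_singleton] at hr
            rw [hr]
            simpa using hrange
          · simp at hr
        · simp at hr
      · split
        next hrange =>
          split
          next hcond =>
            rw [if_pos ⟨by simpa using hrange, hcond⟩]
            unfold pvLk
            rw [List.find?_cons_of_pos (by simp)]
            rfl
          next hcond =>
            rw [if_neg (by intro h; exact hcond h.2)]
            exact pvLk_none_of_sub [] _ (by simp)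
        next hrange =>
          rw [if_neg (by intro h; exact hrange (by simpa using h.1))]
          exact pvLk_none_of_sub [] _ (by simp)

-- Splitting pvEmit at an index where all earlier insertions are empty.
lemma pvEmit_split (lines : List String) (ins : Int → List String) :
    ∀ (k a : Nat), a + k ≤ lines.length →
    (∀ j : Int, (a : Int) ≤ j → j < (a : Int) + (k : Int) → ins j = []) →
    pvEmit ins (lines.drop a) a = (lines.drop a).take k ++ pvEmit ins (lines.drop (a + k)) ((a + k : Nat) : Int) := by
  intro k
  induction k with
  | zero => intro a _ _; simp
  | succ k ihk =>
    intro a hlen hins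
    have ha : a < lines.length := by omega
    have hd : lines.drop a = lines[a] :: lines.drop (a + 1) := List.drop_eq_getElem_cons ha
    rw [hd]
    show ins a ++ lines[a] :: pvEmit ins (lines.drop (a + 1)) ((a : Int) + 1) = _
    rw [hins a le_rfl (by push_cast; omega)]
    have h1 : ((a : Int) + 1) = ((a + 1 : Nat) : Int) := by push_cast; ring
    rw [h1, ihk (a + 1) (by omega) (fun j hj1 hj2 => hins j (by push_cast at *; omega) (by push_cast at *; omega))]
    have h2 : a + 1 + k = a + (k + 1) := by omega
    rw [h2, List.take_succ_cons]
    simp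

-- Emission with no insertions anywhere is the identity.
lemma pvEmit_all_nil (ins : Int → List String) :
    ∀ (l : List String) (i : Int), (∀ j : Int, i ≤ j → j < i + l.length → ins j = []) → pvEmit ins l i = l := by
  intro l
  induction l with
  | nil => intro i _; rfl
  | cons x t ih =>
    intro i h
    show ins i ++ x :: pvEmit ins t (i + 1) = x :: t
    rw [h i le_rfl (by simp only [List.length_cons]; push_cast; omega)]
    rw [ih (i + 1) (fun j hj1 hj2 => h j (by omega) (by simp only [List.length_cons]; push_cast at hj2 ⊢; omega))]
    rfl

-- The splice loop over sorted in-range points produces exactly the interleaved emission.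
lemma pvSplice (lines : List String) (ins : Int → List String) :
    ∀ (pts : List (Int × List String)) (prev : Int) (out : List String),
    0 ≤ prev → prev ≤ (lines.length : Int) →
    (∀ q ∈ pts, prev ≤ q.1 ∧ q.1 < (lines.length : Int)) →
    pts.Pairwise (fun a b => a.1 < b.1) →
    (∀ j : Int, prev ≤ j → j < (lines.length : Int) → ins j = (pvLk pts j).getD []) →
    ((pts.foldl (pvStep2 lines) (out, prev)).1
      ++ PySem.List.slice lines (some (pts.foldl (pvStep2 lines) (out, prev)).2) none)
      = out ++ pvEmit ins (lines.drop prev.toNat) prev := by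
  intro pts
  induction pts with
  | nil =>
    intro prev out h0 hn _ _ hins
    simp only [List.foldl_nil]
    rw [PySem.List.slice_from _ h0]
    rw [pvEmit_all_nil ins (lines.drop prev.toNat) prev (fun j hj1 hj2 => by
      rw [List.length_drop] at hj2
      have hp : (prev.toNat : Int) = prev := Int.toNat_of_nonneg h0
      rw [hins j hj1 (by omega), pvLk_none_of_sub [] j (by simp)]
      rfl)]
  | cons q rest ihp =>
    intro prev out h0 hn hrange hpw hins
    obtain ⟨hq1, hq2⟩ := hrange q (by simp)
    have hq0 : (0 : Int) ≤ q.1 := le_trans h0 hq1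
    simp only [List.foldl_cons]
    have hrest_lt : ∀ r ∈ rest, q.1 < r.1 := (List.pairwise_cons.mp hpw).1
    rw [show pvStep2 lines (out, prev) q
        = (((out ++ PySem.List.slice lines (some prev) (some q.1)) ++ q.2) ++ [(PySem.List.pyGet? lines q.1).getD ""], q.1 + 1) from rfl]
    rw [ihp (q.1 + 1) _ (by omega) (by omega)
        (fun r hr => ⟨by have := hrest_lt r hr; omega, (hrange r (List.mem_cons_of_mem _ hr)).2⟩)
        (List.pairwise_cons.mp hpw).2
        (fun j hj1 hj2 => by
          rw [hins j (by omega) hj2]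
          unfold pvLk
          rw [List.find?_cons_of_neg (by simp only [beq_iff_eq]; omega)])]
    -- now compute the right-hand emission: split at q.1
    have hsplit := pvEmit_split lines ins (q.1.toNat - prev.toNat) prev.toNat
      (by omega) (fun j hj1 hj2 => by
        rw [hins j (by omega) (by omega)]
        rw [pvLk_none_of_sub]
        · rfl
        · intro r hr
          rcases List.mem_cons.mp hr with rfl | hr'
          · omega
          · have := hrest_lt r hr'; omega)
    have hak : prev.toNat + (q.1.toNat - prev.toNat) = q.1.toNat := by omega
    rw [hak] at hsplit
    have hqn : ((q.1.toNat : Nat) : Int) = q.1 := Int.toNat_of_nonneg hq0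
    rw [hqn] at hsplit
    have hprevn : ((prev.toNat : Nat) : Int) = prev := Int.toNat_of_nonneg h0
    rw [hprevn] at hsplit
    rw [hsplit]
    have hqlt : q.1.toNat < lines.length := by omega
    have hdq : lines.drop q.1.toNat = lines[q.1.toNat] :: lines.drop (q.1.toNat + 1) := List.drop_eq_getElem_cons hqlt
    rw [hdq]
    show _ = out ++ ((lines.drop prev.toNat).take (q.1.toNat - prev.toNat)
      ++ (ins q.1 ++ lines[q.1.toNat] :: pvEmit ins (lines.drop (q.1.toNat + 1)) (q.1 + 1)))
    have hinsq : ins q.1 = q.2 := by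
      rw [hins q.1 (by omega) hq2]
      unfold pvLk
      rw [List.find?_cons_of_pos (by simp)]
      rfl
    have hslice : PySem.List.slice lines (some prev) (some q.1) = (lines.drop prev.toNat).take (q.1.toNat - prev.toNat) :=
      PySem.List.slice_toNat lines h0 hq0
    have hget : (PySem.List.pyGet? lines q.1).getD "" = lines[q.1.toNat] := by
      have hsome : PySem.List.pyGet? lines q.1 = some lines[q.1.toNat] := by
        conv_lhs => rw [← hqn]
        rw [PySem.List.pyGet?_natCast]
        exact List.getElem?_eq_getElem hqlt
      rw [hsome]
      rfl
    have hdrop1 : (q.1 + 1).toNat = q.1.toNat + 1 := by omega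
    rw [hdrop1, hinsq, hslice, hget]
    simp

theorem generate_annotated_content_spec : Claim_equal_generate_annotated_content := by
  intro original_content scenarios classifications _hdom _hpre
  unfold Spec_generate_annotated_content generate_annotated_content generate_annotated_content_alt
  dsimp only
  set lines : List String := (PySem.Str.split? original_content "\n").getD [] with hlines
  set ps : List (List (String × Int) × String) := scenarios.zip classifications with hps
  set dA : PySem.Dict Int String :=
    ps.foldl (fun d p => d.insert ((p.1.lookup "start_line").getD 0) p.2) PySem.Dict.empty with hdA
  congr 1
  -- === A's side: rewrite the emission loop to pvEmit (pvIns lines dA) lines 0 ===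
  have hA : (PySem.List.enumerate lines).foldl
      (fun acc il =>
        let i := il.1
        let line := il.2
        let acc :=
          match dA.get? i with
          | some classification =>
            let scenario_line := PySem.Str.strip line
            if PySem.Str.startswith scenario_line "Scenario:" || PySem.Str.startswith scenario_line "Scenario Outline:" then
              let indent : Nat := (PySem.Str.len line - PySem.Str.len (PySem.Str.lstrip line)).toNat
              let tag_indent : String := String.ofList (List.replicate indent ' ')
              if classification == "smoke_regression" then
                (acc ++ [tag_indent ++ "@smoke"]) ++ [tag_indent ++ "@regression"]
              else
                acc ++ [tag_indent ++ "@regression"]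
            else acc
          | none => acc
        acc ++ [line]) []
      = pvEmit (pvIns lines dA) lines 0 := by
    rw [PySem.List.foldl_congr_mem (g := fun acc il => acc ++ (pvIns lines dA il.1 ++ [il.2]))]
    · rw [PySem.List.foldl_append_eq_flatMap]
      rw [pvEmit_enum]
      rfl
    · intro acc il hil
      rcases (PySem.List.mem_enumerate_iff _ _ _).mp hil with ⟨k, hk, rfl⟩
      have hline : pvLine lines ((0 : Int) + k) = lines[k] := by
        unfold pvLine
        simp [PySem.List.pyGet?_natCast, List.getElem?_eq_getElem hk]
      dsimp only
      unfold pvIns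
      cases hg : dA.get? ((0 : Int) + k) with
      | none => simp
      | some c =>
        rw [hline]
        unfold pvCond pvTags
        dsimp only
        split_ifs <;> simp
  rw [hA]
  -- === B's side ===
  obtain ⟨hb1, hb2, _, hb4⟩ := pvPhase1 lines ps.reverse PySem.Set.empty [] (by simp) (by simp)
  set pts0 : List (Int × List String) := (ps.reverse.foldl (pvStep1 lines) (PySem.Set.empty, [])).2 with hpts0
  set points : List (Int × List String) := PySem.List.sorted pts0 (fun q => q.1) false with hpoints
  have hperm : points.Perm pts0 := PySem.List.sorted_perm pts0 (fun q => q.1) false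
  have hndp : (points.map Prod.fst).Nodup := ((hperm.map Prod.fst).nodup_iff).mpr hb2
  have hpw : points.Pairwise (fun a b => a.1 < b.1) := by
    have hle : points.Pairwise (fun a b => a.1 ≤ b.1) := PySem.List.sorted_pairwise pts0 (fun q => q.1)
    have hne : points.Pairwise (fun a b => a.1 ≠ b.1) := (List.pairwise_map.mp hndp)
    exact (hle.and hne).imp (fun h => lt_of_le_of_ne h.1 h.2)
  have hrange : ∀ q ∈ points, (0 : Int) ≤ q.1 ∧ q.1 < (lines.length : Int) := by
    intro q hq
    rcases hb1 q (hperm.mem_iff.mp hq) with h | h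
    · cases h
    · exact h
  have hins : ∀ j : Int, (0 : Int) ≤ j → j < (lines.length : Int) →
      pvIns lines dA j = (pvLk points j).getD [] := by
    intro j hj1 hj2
    rw [pvLk_perm hperm hb2 j, hb4 j (by simp)]
    unfold pvIns
    rw [hdA, pvDict_get]
    rw [PySem.Dict.get?_empty]
    cases hf : ps.reverse.find? (fun p => ((p.1.lookup "start_line").getD 0) == j) with
    | none => rfl
    | some p =>
      dsimp only
      by_cases hcond : pvCond (pvLine lines j) = true
      · rw [if_pos hcond, if_pos ⟨⟨hj1, hj2⟩, hcond⟩]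
        rfl
      · rw [if_neg hcond, if_neg (by intro h; exact hcond h.2)]
        rfl
  have hsp := pvSplice lines (pvIns lines dA) points 0 [] le_rfl (by simp) hrange hpw
    (fun j h1 h2 => hins j h1 h2)
  simp only [Int.toNat_zero, List.drop_zero, List.nil_append] at hsp
  exact hsp.symm
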